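-- pv_equiv track=rewrite | github.com/shaw0615/UNSW-COMP9021-20T3 | quiz1/quiz1.py | cons_multidict
-- ===== SOURCE A (Python) =====
-- def cons_multidict(dic,length):
--     d1 = {}
--     dic = dict(sorted(dic.items(), key=lambda x: x[0]))
--     for i in length:
--         for x in dic:
--             if len(dic[x]) == i:
--                 d1.setdefault(i,{})[x] = dic[x]
--     return d1
-- ===== SOURCE B (Python) =====
-- def cons_multidict(dic, length):
--     groups = {}
--     for x in sorted(dic):
--         v = dic[x]
--         groups.setdefault(len(v), []).append((x, v))
--     out = {}
--     for i in length:
--         if i in groups: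
--             out[i] = dict(groups[i])
--     return out
-- ===== Notes on version B (the rewrite author's own statement) =====
-- stated objective: faster
-- what changed: Instead of rescanning the whole dict for every entry of `length` (A), B sorts the keys once, buckets all items by value length in a single pass into a length-keyed dict, and then emits the precomputed buckets in `length` order.
import Mathlib
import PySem

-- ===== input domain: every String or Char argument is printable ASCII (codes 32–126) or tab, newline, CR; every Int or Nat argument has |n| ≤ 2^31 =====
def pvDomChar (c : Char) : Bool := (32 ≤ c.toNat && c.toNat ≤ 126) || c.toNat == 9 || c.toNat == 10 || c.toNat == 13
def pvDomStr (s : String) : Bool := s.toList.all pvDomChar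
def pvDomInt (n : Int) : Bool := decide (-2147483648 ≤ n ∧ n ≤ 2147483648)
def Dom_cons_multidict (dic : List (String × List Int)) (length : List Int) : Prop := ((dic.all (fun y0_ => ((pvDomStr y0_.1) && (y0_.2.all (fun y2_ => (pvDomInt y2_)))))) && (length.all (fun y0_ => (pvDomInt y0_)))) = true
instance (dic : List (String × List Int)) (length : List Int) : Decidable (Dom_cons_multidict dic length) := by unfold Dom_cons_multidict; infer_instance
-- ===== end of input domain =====

-- B groups the key-sorted items by value length in ONE pass into a length-keyed dict and then
-- emits the groups in `length` order, instead of A's rescan of the whole dict for every length.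

-- ===== PORT A =====
def cons_multidict (dic : List (String × List Int)) (length : List Int) : List (Int × List (String × List Int)) :=
  let d0 : PySem.Dict String (List Int) := PySem.Dict.ofList dic
  -- dic = dict(sorted(dic.items(), key=lambda x: x[0]))
  let d : PySem.Dict String (List Int) :=
    PySem.Dict.ofList (PySem.List.sorted d0.items (fun x => x.1) false)
  -- for i in length: for x in dic: if len(dic[x]) == i: d1.setdefault(i,{})[x] = dic[x]
  let d1 : PySem.Dict Int (PySem.Dict String (List Int)) :=
    length.foldl (fun d1 i =>
      d.keys.foldl (fun d1 x =>
        if ((d.getD x []).length : Int) == i then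
          d1.modify i PySem.Dict.empty (fun inner => inner.insert x (d.getD x []))
        else d1) d1) PySem.Dict.empty
  d1.items.map (fun p => (p.1, p.2.items))

-- ===== PORT B =====
def cons_multidict_alt (dic : List (String × List Int)) (length : List Int) : List (Int × List (String × List Int)) :=
  let d0 : PySem.Dict String (List Int) := PySem.Dict.ofList dic
  -- for x in sorted(dic): groups.setdefault(len(dic[x]), []).append((x, dic[x]))
  let groups : PySem.Dict Int (List (String × List Int)) :=
    (PySem.List.sorted d0.keys (fun x => x) false).foldl
      (fun g x => g.modify ((d0.getD x []).length : Int) [] (fun l => l ++ [(x, d0.getD x [])]))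
      PySem.Dict.empty
  -- for i in length: if i in groups: out[i] = dict(groups[i])
  let out : PySem.Dict Int (PySem.Dict String (List Int)) :=
    length.foldl (fun out i =>
      if groups.contains i then out.insert i (PySem.Dict.ofList (groups.getD i [])) else out)
      PySem.Dict.empty
  out.items.map (fun p => (p.1, p.2.items))

-- ===== PRECONDITION & SPEC =====
def Spec_cons_multidict (dic : List (String × List Int)) (length : List Int) (out : List (Int × List (String × List Int))) : Prop := out = cons_multidict_alt dic length
instance (dic : List (String × List Int)) (length : List Int) (out : List (Int × List (String × List Int))) : Decidable (Spec_cons_multidict dic length out) := by unfold Spec_cons_multidict; infer_instance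

-- ===== CLAIM (what is proved, stated in full; the proofs are below) =====
def Claim_equal_cons_multidict : Prop := ∀ (dic : List (String × List Int)) (length : List Int), Dom_cons_multidict dic length → Spec_cons_multidict dic length (cons_multidict dic length)

-- ===== LEMMAS AND PROOFS =====

-- a foldl whose step fixes b stays at b
theorem pv_foldl_fixed {α β : Type} (l : List α) (f : β → α → β) (b : β)
    (h : ∀ x ∈ l, f b x = b) : l.foldl f b = b := by
  induction l with
  | nil => rfl
  | cons x xs ih =>
    simp only [List.foldl_cons, h x (by simp)]
    exact ih (fun y hy => h y (by simp [hy]))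

-- two members of a fst-nodup pair list with equal fst are equal
theorem pv_eq_of_fst_eq {α β : Type} {l : List (α × β)} (hnd : (l.map Prod.fst).Nodup)
    {a b : α × β} (ha : a ∈ l) (hb : b ∈ l) (hfst : a.1 = b.1) : a = b := by
  induction l with
  | nil => cases ha
  | cons p ps ih =>
    simp only [List.map_cons, List.nodup_cons, List.mem_map] at hnd
    rcases List.mem_cons.mp ha with rfl | ha' <;>
      rcases List.mem_cons.mp hb with rfl | hb'
    · rfl
    · exact absurd ⟨b, hb', hfst.symm⟩ hnd.1
    · exact absurd ⟨a, ha', hfst⟩ hnd.1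
    · exact ih hnd.2 ha' hb'

-- inserting a pair already present (keys nodup) is a no-op
theorem pv_insert_mem {d : PySem.Dict String (List Int)} {k : String} {v : List Int}
    (hmem : (k, v) ∈ d.items) (hnd : d.keys.Nodup) : d.insert k v = d := by
  have hc : d.contains k = true := by
    simp only [PySem.Dict.contains, List.any_eq_true]
    exact ⟨(k, v), hmem, by simp⟩
  apply PySem.Dict.ext
  rw [PySem.Dict.items_insert_of_contains _ _ hc]
  conv_rhs => rw [← List.map_id d.items]
  apply List.map_congr_left
  intro p hp
  by_cases h : p.1 = k
  · have : p = (k, v) := pv_eq_of_fst_eq (by simpa [PySem.Dict.keys] using hnd) hp hmem h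
    simp [this]
  · simp [h]

-- ofList of a fst-nodup pair list has exactly that items list
theorem pv_items_ofList {l : List (String × List Int)} (hnd : (l.map Prod.fst).Nodup) :
    (PySem.Dict.ofList l).items = l := by
  have := PySem.Dict.items_foldl_insert_fresh l Prod.fst Prod.snd PySem.Dict.empty
    (fun a _ => by simp [PySem.Dict.contains_empty]) hnd
  simpa [PySem.Dict.ofList, PySem.Dict.update] using this

-- re-folding the same fst-nodup pairs into their dict changes nothing
theorem pv_refold {l : List (String × List Int)} (hnd : (l.map Prod.fst).Nodup) :
    l.foldl (fun d p => d.insert p.1 p.2) (PySem.Dict.ofList l) = PySem.Dict.ofList l := by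
  apply pv_foldl_fixed
  intro p hp
  exact pv_insert_mem (by rw [pv_items_ofList hnd]; exact hp)
    (by rw [PySem.Dict.keys, pv_items_ofList hnd]; exact hnd)

-- A's inner loop in closed form: it inserts the filtered group at key i (if nonempty)
theorem pv_inner (ps : List (String × List Int)) (i : Int)
    (d1 : PySem.Dict Int (PySem.Dict String (List Int))) :
    ps.foldl (fun d p =>
        if ((p.2.length : Int) == i) then
          d.modify i PySem.Dict.empty (fun inner => inner.insert p.1 p.2)
        else d) d1 =
      if ps.filter (fun p => ((p.2.length : Int) == i)) = [] then d1
      else d1.insert i ((ps.filter (fun p => ((p.2.length : Int) == i))).foldl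
        (fun d p => d.insert p.1 p.2) (d1.getD i PySem.Dict.empty)) := by
  induction ps generalizing d1 with
  | nil => simp
  | cons p ps ih =>
    by_cases hp : ((p.2.length : Int) == i) = true
    · simp only [List.foldl_cons, List.filter_cons, hp, if_pos, ih]
      by_cases hrest : ps.filter (fun p => ((p.2.length : Int) == i)) = []
      · simp only [hrest, if_pos, PySem.Dict.modify]
        simp
      · simp only [hrest, if_neg (by simp : ¬(p :: _ = [])),
          PySem.Dict.modify, PySem.Dict.insert_insert_self, PySem.Dict.getD_insert_self]
        simp
    · simp only [List.foldl_cons, List.filter_cons, hp]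
      simp only [Bool.false_eq_true, if_false, ih]

-- the two outer loops agree, given that every stored group is the dict of its filter
theorem pv_outer (ps : List (String × List Int)) (hnd : (ps.map Prod.fst).Nodup)
    (length : List Int) (d : PySem.Dict Int (PySem.Dict String (List Int)))
    (hinv : ∀ i m, d.get? i = some m →
      m = PySem.Dict.ofList (ps.filter (fun p => ((p.2.length : Int) == i)))) :
    length.foldl (fun d i =>
        if ps.filter (fun p => ((p.2.length : Int) == i)) = [] then d
        else d.insert i ((ps.filter (fun p => ((p.2.length : Int) == i))).foldl
          (fun d p => d.insert p.1 p.2) (d.getD i PySem.Dict.empty))) d =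
      length.foldl (fun d i =>
        if ps.filter (fun p => ((p.2.length : Int) == i)) = [] then d
        else d.insert i (PySem.Dict.ofList
          (ps.filter (fun p => ((p.2.length : Int) == i))))) d := by
  induction length generalizing d with
  | nil => rfl
  | cons i rest ih =>
    simp only [List.foldl_cons]
    by_cases hf : ps.filter (fun p => ((p.2.length : Int) == i)) = []
    · simp only [hf, if_pos]
      exact ih d hinv
    · have hndf : ((ps.filter (fun p => ((p.2.length : Int) == i))).map Prod.fst).Nodup :=
        (List.Sublist.map Prod.fst List.filter_sublist).nodup hnd
      have hstep : (ps.filter (fun p => ((p.2.length : Int) == i))).foldl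
          (fun d p => d.insert p.1 p.2) (d.getD i PySem.Dict.empty)
          = PySem.Dict.ofList (ps.filter (fun p => ((p.2.length : Int) == i))) := by
        rcases hg : d.get? i with _ | m
        · rw [PySem.Dict.getD_eq_get?_getD, hg]
          rfl
        · rw [PySem.Dict.getD_eq_get?_getD, hg, Option.getD_some, hinv i m hg]
          exact pv_refold hndf
      simp only [hf, ite_false, hstep]
      apply ih
      intro j m hj
      rw [PySem.Dict.get?_insert] at hj
      by_cases hji : j = i
      · subst hji; simp at hj; exact hj.symm
      · rw [if_neg hji] at hj; exact hinv j m hj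

theorem pv_main (dic : List (String × List Int)) (length : List Int) :
    cons_multidict dic length = cons_multidict_alt dic length := by
  dsimp only [cons_multidict, cons_multidict_alt]
  set d0 : PySem.Dict String (List Int) := PySem.Dict.ofList dic with hd0
  set skeys := PySem.List.sorted d0.keys (fun x => x) false with hskeys
  set g : String → String × List Int := fun x => (x, d0.getD x []) with hg
  set ps := skeys.map g with hps
  -- basic facts
  have hk : d0.keys.Nodup := PySem.Dict.nodup_keys_ofList dic
  have hsk_nodup : skeys.Nodup := ((PySem.List.sorted_perm d0.keys (fun x => x) false).nodup_iff).mpr hk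
  have hps_fst : ps.map Prod.fst = skeys := by
    simp [hps, hg, List.map_map, Function.comp_def]
  have hps_nodup : (ps.map Prod.fst).Nodup := by rw [hps_fst]; exact hsk_nodup
  have hsk_lt : skeys.Pairwise (· < ·) := by
    have h1 : skeys.Pairwise (fun a b => a ≤ b) :=
      PySem.List.sorted_pairwise d0.keys (fun x => x)
    have h2 : skeys.Pairwise (fun a b => a ≠ b) := hsk_nodup
    exact (h1.and h2).imp (fun h => lt_of_le_of_ne h.1 h.2)
  have hitems0 : d0.items = d0.keys.map g := PySem.Dict.items_eq_map_keys d0 hk []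
  have hperm : ps.Perm d0.items := by
    rw [hitems0, hps]
    exact (PySem.List.sorted_perm d0.keys (fun x => x) false).map g
  have hsorted_items : PySem.List.sorted d0.items (fun x => x.1) false = ps := by
    apply PySem.List.sorted_eq_of_perm_of_pairwise_lt _ _ _ hperm
    rw [hps, List.pairwise_map]
    exact hsk_lt
  set d : PySem.Dict String (List Int) :=
    PySem.Dict.ofList (PySem.List.sorted d0.items (fun x => x.1) false) with hd
  have hdic_items : d.items = ps := by rw [hd, hsorted_items]; exact pv_items_ofList hps_nodup
  have hdic_keys : d.keys = skeys := by rw [PySem.Dict.keys, hdic_items, hps_fst]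
  have hgetD : ∀ x ∈ skeys, d.getD x [] = d0.getD x [] := by
    intro x hx
    have hmem : (x, d0.getD x []) ∈ d.items := by
      rw [hdic_items, hps]; exact List.mem_map_of_mem hx
    exact PySem.Dict.getD_of_mem_items d hmem (by rw [hdic_keys]; exact hsk_nodup) []
  -- ===== A side =====
  have hAfun :
      (fun (d1 : PySem.Dict Int (PySem.Dict String (List Int))) (i : Int) =>
        d.keys.foldl (fun d1 x =>
          if ((d.getD x []).length : Int) == i then
            d1.modify i PySem.Dict.empty (fun inner => inner.insert x (d.getD x []))
          else d1) d1)
      = (fun d1 i =>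
          if ps.filter (fun p => ((p.2.length : Int) == i)) = [] then d1
          else d1.insert i ((ps.filter (fun p => ((p.2.length : Int) == i))).foldl
            (fun dd p => dd.insert p.1 p.2) (d1.getD i PySem.Dict.empty))) := by
    funext d1 i
    rw [hdic_keys]
    have h1 : skeys.foldl (fun d1 x =>
        if ((d.getD x []).length : Int) == i then
          d1.modify i PySem.Dict.empty (fun inner => inner.insert x (d.getD x []))
        else d1) d1
      = skeys.foldl (fun d1 x =>
        if ((d0.getD x []).length : Int) == i then
          d1.modify i PySem.Dict.empty (fun inner => inner.insert x (d0.getD x []))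
        else d1) d1 := by
      apply PySem.List.foldl_congr_mem
      intro acc x hx
      rw [hgetD x hx]
    rw [h1]
    have h2 : skeys.foldl (fun d1 x =>
        if ((d0.getD x []).length : Int) == i then
          d1.modify i PySem.Dict.empty (fun inner => inner.insert x (d0.getD x []))
        else d1) d1
      = ps.foldl (fun dd p =>
        if ((p.2.length : Int) == i) then
          dd.modify i PySem.Dict.empty (fun inner => inner.insert p.1 p.2)
        else dd) d1 := by
      rw [hps, List.foldl_map]
    rw [h2, pv_inner]
  rw [hAfun]
  -- ===== B side =====
  set f : String → Int × (String × List Int) :=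
    fun x => (((d0.getD x []).length : Int), (x, d0.getD x [])) with hf
  have hgr2 : (skeys.foldl (fun gg x =>
        gg.modify ((d0.getD x []).length : Int) [] (fun l => l ++ [(x, d0.getD x [])]))
        PySem.Dict.empty)
      = (skeys.map f).foldl (fun gg q => gg.modify q.1 [] (fun l => l ++ [q.2]))
        PySem.Dict.empty := by
    rw [List.foldl_map]
  rw [hgr2]
  set groups := (skeys.map f).foldl (fun gg q => gg.modify q.1 [] (fun l => l ++ [q.2]))
    PySem.Dict.empty with hgr
  have hgetD_groups : ∀ i : Int,
      groups.getD i [] = ps.filter (fun p => ((p.2.length : Int) == i)) := by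
    intro i
    rw [hgr, PySem.Dict.getD_foldl_modify_append (skeys.map f) PySem.Dict.empty i]
    rw [List.filter_map, List.map_map]
    rw [hps, List.filter_map]
    simp [hf, hg, Function.comp_def]
  have hcont : ∀ i : Int, (groups.contains i = true) ↔
      ¬ (ps.filter (fun p => ((p.2.length : Int) == i)) = []) := by
    intro i
    rw [PySem.Dict.contains_iff_mem_keys, hgr,
      PySem.Dict.keys_foldl_modify_key (skeys.map f) Prod.fst [] (fun _ q => fun l => l ++ [q.2])
        PySem.Dict.empty,
      PySem.Dict.keys_empty, PySem.Set.update_nil_left, PySem.Set.mem_ofList]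
    rw [hps]
    simp [hf, hg, List.map_map, Function.comp_def, List.filter_eq_nil_iff]
  have hBfun :
      (fun (out : PySem.Dict Int (PySem.Dict String (List Int))) (i : Int) =>
        if groups.contains i then out.insert i (PySem.Dict.ofList (groups.getD i [])) else out)
      = (fun out i =>
          if ps.filter (fun p => ((p.2.length : Int) == i)) = [] then out
          else out.insert i (PySem.Dict.ofList
            (ps.filter (fun p => ((p.2.length : Int) == i))))) := by
    funext out i
    by_cases hfi : ps.filter (fun p => ((p.2.length : Int) == i)) = []
    · have : groups.contains i = false := by
        rcases Bool.eq_false_or_eq_true (groups.contains i) with h | h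
        · exact absurd hfi ((hcont i).mp h)
        · exact h
      rw [this, if_neg (by simp), if_pos hfi]
    · rw [if_pos ((hcont i).mpr hfi), if_neg hfi, hgetD_groups]
  rw [hBfun]
  -- ===== the two outer folds agree =====
  have houter := pv_outer ps hps_nodup length PySem.Dict.empty
    (by intro i m h; rw [PySem.Dict.get?_empty] at h; cases h)
  rw [houter]

-- ===== VERDICT (by name: the statement is the Claim_ definition above) =====
theorem cons_multidict_spec : Claim_equal_cons_multidict := by
  intro dic length _hdom
  unfold Spec_cons_multidict
  exact pv_main dic length
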